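-- pv_equiv track=rewrite | github.com/c940606/leetcode | 面试题 16.18. Pattern Matching LCCI.py | patternMatching
-- ===== SOURCE A (Python) =====
-- def patternMatching(pattern: str, value: str) -> bool:
-- 	p_len, v_len = len(pattern), len(value)
-- 	lookup = {}
-- 	v = {}
-- 	def dfs(i, j):
-- 		if i == p_len and j == v_len: return True
-- 		if i >= p_len: return False
-- 		for k in range(j, v_len + 1):
-- 			tmp_v = value[j:k]
-- 			if pattern[i] in lookup and lookup[pattern[i]] == tmp_v:
-- 				return dfs(i + 1, j + len(tmp_v))
-- 			if tmp_v not in v and pattern[i] not in lookup: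
-- 				lookup[pattern[i]] = tmp_v
-- 				v[tmp_v] = pattern[i]
-- 				if dfs(i + 1, j + len(tmp_v)): return True
-- 				lookup.pop(pattern[i])
-- 				v.pop(tmp_v)
-- 		return False
--
-- 	return dfs(0, 0)
-- ===== SOURCE B (Python) =====
-- def patternMatching(pattern: str, value: str) -> bool:
--     # Enumerate a length for each distinct pattern letter (budget-pruned by the
--     # remaining value length), then verify the induced substring assignment in
--     # one linear pass over the pattern.
--     order = []
--     counts = {}
--     for c in pattern:
--         if c in counts:
--             counts[c] += 1
--         else:
--             counts[c] = 1
--             order.append(c)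
--     n = len(value)
--
--     def verify(lens):
--         mp = {}
--         seen = set()
--         pos = 0
--         for c in pattern:
--             l = lens[c]
--             s = value[pos:pos + l]
--             if c in mp:
--                 if mp[c] != s:
--                     return False
--             else:
--                 if s in seen:
--                     return False
--                 mp[c] = s
--                 seen.add(s)
--             pos += l
--         return True
--
--     def choose(idx, rem, lens):
--         if idx == len(order):
--             return rem == 0 and verify(lens)
--         c = order[idx]
--         cnt = counts[c]
--         for l in range(rem // cnt + 1):
--             if choose(idx + 1, rem - cnt * l, dict(lens, **{c: l})):
--                 return True
--         return False
--
--     return choose(0, n, {})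
-- ===== Notes on version B (the rewrite author's own statement) =====
-- stated objective: alternative
-- what changed: A backtracks over substring assignments position by position with two mutually-inverse dicts and undo-on-failure; B instead enumerates a length for each distinct pattern letter (budget-pruned by the remaining value length: the lengths must weight-sum to len(value)) and then verifies the induced substring assignment in one linear pass over the pattern.
import Mathlib
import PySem

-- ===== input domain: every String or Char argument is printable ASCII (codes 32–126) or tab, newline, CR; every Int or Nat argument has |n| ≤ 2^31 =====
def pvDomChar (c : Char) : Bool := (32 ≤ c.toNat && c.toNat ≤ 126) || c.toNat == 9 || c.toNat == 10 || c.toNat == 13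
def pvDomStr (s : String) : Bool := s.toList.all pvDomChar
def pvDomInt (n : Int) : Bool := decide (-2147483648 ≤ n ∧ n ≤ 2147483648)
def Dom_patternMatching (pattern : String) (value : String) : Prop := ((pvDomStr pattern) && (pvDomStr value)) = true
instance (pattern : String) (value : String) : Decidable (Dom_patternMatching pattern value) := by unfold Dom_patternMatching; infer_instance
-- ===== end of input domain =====

-- B replaces A's per-substring backtracking (two mutually-inverse dicts, undo on failure)
-- by enumerating a length for each distinct pattern letter (budget-pruned) and verifying
-- the induced substring assignment in one pass; objective: alternative algorithm.

-- ===== PORT A =====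
-- the inner 'for k in range(j, v_len + 1)' of dfs, with `next` = dfs(i+1, ·);
-- Python's lookup.pop / v.pop restoration is the functional threading of the
-- unchanged dicts into the next iteration.  value[j:k] (0 ≤ j ≤ k) = (drop j).take (k-j).
def loopA (w : List Char) (c : Char)
    (next : Nat → PySem.Dict Char (List Char) → PySem.Dict (List Char) Char → Bool)
    (j : Nat) (lookup : PySem.Dict Char (List Char)) (v : PySem.Dict (List Char) Char)
    (k : Nat) : Bool :=
  if k > w.length then false
  else
    let tmp := (w.drop j).take (k - j)
    match lookup.get? c with
    | some s =>
        if s = tmp then next (j + tmp.length) lookup v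
        else loopA w c next j lookup v (k + 1)
    | none =>
        match v.get? tmp with
        | none =>
            if next (j + tmp.length) (lookup.insert c tmp) (v.insert tmp c) then true
            else loopA w c next j lookup v (k + 1)
        | some _ => loopA w c next j lookup v (k + 1)
termination_by w.length + 1 - k
decreasing_by all_goals omega

-- dfs(i, j); pattern[i] is guarded by i < p_len, so getD is exact
def dfsA (p w : List Char) (i j : Nat)
    (lookup : PySem.Dict Char (List Char)) (v : PySem.Dict (List Char) Char) : Bool :=
  if i = p.length ∧ j = w.length then true
  else if i ≥ p.length then false
  else loopA w (p.getD i ' ') (fun j' L' V' => dfsA p w (i + 1) j' L' V') j lookup v j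
termination_by p.length - i
decreasing_by omega

def patternMatching (pattern : String) (value : String) : Bool :=
  dfsA pattern.toList value.toList 0 0 PySem.Dict.empty PySem.Dict.empty

-- ===== PORT B =====
-- verify(lens): one pass over the pattern, mp = letter → substring, seen = used substrings
def verifyB (w : List Char) (lens : PySem.Dict Char Nat) :
    List Char → Nat → PySem.Dict Char (List Char) → PySem.Set (List Char) → Bool
  | [], _, _, _ => true
  | c :: rest, pos, mp, seen =>
      let l := lens.getD c 0
      let s := (w.drop pos).take l
      match mp.get? c with
      | some s' => if s' = s then verifyB w lens rest (pos + l) mp seen else false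
      | none =>
          if seen.contains s then false
          else verifyB w lens rest (pos + l) (mp.insert c s) (seen.add s)

-- 'for l in range(rem // cnt + 1)' of choose, with `next` = choose(idx+1, rem-cnt*l, lens[c:=l])
def loopB (c : Char) (cnt rem : Nat) (lens : PySem.Dict Char Nat)
    (next : Nat → PySem.Dict Char Nat → Bool) (l : Nat) : Bool :=
  if l > rem / cnt then false
  else if next (rem - cnt * l) (lens.insert c l) then true
  else loopB c cnt rem lens next (l + 1)
termination_by rem / cnt + 1 - l
decreasing_by omega

-- choose(idx, rem, lens); idx never exceeds len(order), '≥' only makes the guard total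
def chooseB (order : List Char) (counts : PySem.Dict Char Nat)
    (verify : PySem.Dict Char Nat → Bool) (idx rem : Nat) (lens : PySem.Dict Char Nat) : Bool :=
  if idx ≥ order.length then rem == 0 && verify lens
  else
    let c := order.getD idx ' '
    let cnt := counts.getD c 0
    loopB c cnt rem lens (fun rem' lens' => chooseB order counts verify (idx + 1) rem' lens') 0
termination_by order.length - idx
decreasing_by omega

def patternMatching_alt (pattern : String) (value : String) : Bool :=
  let p := pattern.toList
  let w := value.toList
  let oc := p.foldl
    (fun (acc : List Char × PySem.Dict Char Nat) c =>
      match acc.2.get? c with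
      | some m => (acc.1, acc.2.insert c (m + 1))
      | none => (acc.1 ++ [c], acc.2.insert c 1))
    ([], PySem.Dict.empty)
  chooseB oc.1 oc.2 (fun lens => verifyB w lens p 0 PySem.Dict.empty PySem.Set.empty)
    0 w.length PySem.Dict.empty

-- ===== PRECONDITION & SPEC =====
def Spec_patternMatching (pattern : String) (value : String) (out : Bool) : Prop := out = patternMatching_alt pattern value
instance (pattern : String) (value : String) (out : Bool) : Decidable (Spec_patternMatching pattern value out) := by unfold Spec_patternMatching; infer_instance

-- ===== CLAIM (what is proved, stated in full; the proofs are below) =====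
def Claim_equal_patternMatching : Prop := ∀ (pattern : String) (value : String), Dom_patternMatching pattern value → Spec_patternMatching pattern value (patternMatching pattern value)

-- ===== LEMMAS AND PROOFS =====

-- rendering a pattern under an assignment of substrings to letters
def Renders (g : Char → List Char) (q : List Char) : List Char := (q.map g).flatten

-- the common specification: some letter-to-substring assignment, injective on the
-- pattern's letters, renders the pattern as the value
def SAT (p w : List Char) : Prop :=
  ∃ g : Char → List Char, Set.InjOn g {c | c ∈ p} ∧ Renders g p = w

-- the two dicts of A are mutually inverse
def InvAV (L : PySem.Dict Char (List Char)) (V : PySem.Dict (List Char) Char) : Prop :=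
  ∀ c s, L.get? c = some s ↔ V.get? s = some c

-- what A's dfs(i, j) decides, given the partial map f = lookup.get?
def SATA (p w : List Char) (i j : Nat) (f : Char → Option (List Char)) : Prop :=
  ∃ g : Char → List Char,
    (∀ c s, f c = some s → g c = s) ∧
    Set.InjOn g ({c | c ∈ p.drop i} ∪ {c | (f c).isSome = true}) ∧
    Renders g (p.drop i) = w.drop j

lemma take_drop_len (w : List Char) (j m : Nat) (h : j + m ≤ w.length) :
    ((w.drop j).take m).length = m := by
  simp [List.length_take, List.length_drop]; omega

lemma take_append_drop_eq (w : List Char) (j m : Nat) :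
    (w.drop j).take m ++ w.drop (j + m) = w.drop j := by
  rw [← List.drop_drop, List.take_append_drop]

lemma prefix_split (w : List Char) (j : Nat) (s t : List Char) (hj : j ≤ w.length)
    (h : s ++ t = w.drop j) :
    j + s.length ≤ w.length ∧ s = (w.drop j).take s.length ∧ t = w.drop (j + s.length) := by
  have hlen : s.length + t.length = w.length - j := by
    have := congrArg List.length h
    simpa using this
  refine ⟨by omega, ?_, ?_⟩
  · rw [← h, List.take_left']; rfl
  · rw [← List.drop_drop, ← h, List.drop_left']; rfl

lemma InvAV_empty : InvAV PySem.Dict.empty PySem.Dict.empty := by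
  intro c s
  simp [PySem.Dict.get?_empty]

lemma InvAV_insert (L : PySem.Dict Char (List Char)) (V : PySem.Dict (List Char) Char)
    (hInv : InvAV L V) (c : Char) (s : List Char)
    (hL : L.get? c = none) (hV : V.get? s = none) :
    InvAV (L.insert c s) (V.insert s c) := by
  intro c' s'
  rw [PySem.Dict.get?_insert, PySem.Dict.get?_insert]
  by_cases hcc : c' = c <;> by_cases hss : s' = s
  · rw [if_pos hcc, if_pos hss, hcc, hss]
    simp
  · rw [if_pos hcc, if_neg hss]
    constructor
    · intro h; exact absurd (Option.some.inj h).symm hss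
    · intro h
      rw [hcc] at h
      have h2 := (hInv c s').mpr h
      rw [hL] at h2; exact absurd h2 (by simp)
  · rw [if_neg hcc, if_pos hss]
    constructor
    · intro h
      rw [hss] at h
      have h2 := (hInv c' s).mp h
      rw [hV] at h2; exact absurd h2 (by simp)
    · intro h; exact absurd (Option.some.inj h).symm hcc
  · rw [if_neg hcc, if_neg hss]
    exact hInv c' s'

-- the inner loop when pattern[i] is already assigned: it fires at the unique k = j + |s|
lemma loopA_some_iff (w : List Char) (c : Char)
    (next : Nat → PySem.Dict Char (List Char) → PySem.Dict (List Char) Char → Bool)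
    (j : Nat) (L : PySem.Dict Char (List Char)) (V : PySem.Dict (List Char) Char)
    (s : List Char) (hc : L.get? c = some s) (hj : j ≤ w.length) :
    ∀ k, j ≤ k →
      (loopA w c next j L V k = true ↔
        (k ≤ j + s.length ∧ j + s.length ≤ w.length ∧ (w.drop j).take s.length = s ∧
         next (j + s.length) L V = true)) := by
  suffices H : ∀ n k, w.length + 1 - k = n → j ≤ k →
      (loopA w c next j L V k = true ↔
        (k ≤ j + s.length ∧ j + s.length ≤ w.length ∧ (w.drop j).take s.length = s ∧
         next (j + s.length) L V = true)) by
    intro k hk; exact H _ k rfl hk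
  intro n
  induction n with
  | zero =>
      intro k hn hjk
      unfold loopA
      rw [if_pos (by omega)]
      constructor
      · intro h; exact absurd h (by simp)
      · rintro ⟨h1, h2, _, _⟩; omega
  | succ n ih =>
      intro k hn hjk
      unfold loopA
      by_cases hkw : k > w.length
      · rw [if_pos hkw]
        constructor
        · intro h; exact absurd h (by simp)
        · rintro ⟨h1, h2, _, _⟩; exact absurd (le_trans h1 h2) (by omega)
      · rw [if_neg hkw]
        simp only [hc]
        have hkl : k ≤ w.length := by omega
        have htmplen : ((w.drop j).take (k - j)).length = k - j :=
          take_drop_len w j (k - j) (by omega)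
        by_cases hst : s = (w.drop j).take (k - j)
        · rw [if_pos hst]
          have hsl : s.length = k - j := by rw [hst]; exact htmplen
          have hk_eq : j + s.length = k := by omega
          have hjk' : j + (k - j) = k := by omega
          rw [htmplen, hjk', hk_eq]
          constructor
          · intro h
            exact ⟨le_refl _, by omega, by rw [hsl]; exact hst.symm, h⟩
          · rintro ⟨_, _, _, h⟩; exact h
        · rw [if_neg hst]
          rw [ih (k + 1) (by omega) (by omega)]
          constructor
          · rintro ⟨h1, h2, h3, h4⟩
            exact ⟨by omega, h2, h3, h4⟩
          · rintro ⟨h1, h2, h3, h4⟩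
            refine ⟨?_, h2, h3, h4⟩
            rcases Nat.lt_or_ge k (j + s.length) with h | h
            · omega
            · exfalso
              have hk_eq : k = j + s.length := by omega
              apply hst
              rw [← h3]
              congr 1
              omega

-- the inner loop when pattern[i] is unassigned: success iff some fresh prefix works
lemma loopA_none_iff (w : List Char) (c : Char)
    (next : Nat → PySem.Dict Char (List Char) → PySem.Dict (List Char) Char → Bool)
    (j : Nat) (L : PySem.Dict Char (List Char)) (V : PySem.Dict (List Char) Char)
    (hc : L.get? c = none) (hj : j ≤ w.length) :
    ∀ k, j ≤ k →
      (loopA w c next j L V k = true ↔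
        (∃ m, k ≤ j + m ∧ j + m ≤ w.length ∧ V.get? ((w.drop j).take m) = none ∧
          next (j + m) (L.insert c ((w.drop j).take m)) (V.insert ((w.drop j).take m) c) = true)) := by
  suffices H : ∀ n k, w.length + 1 - k = n → j ≤ k →
      (loopA w c next j L V k = true ↔
        (∃ m, k ≤ j + m ∧ j + m ≤ w.length ∧ V.get? ((w.drop j).take m) = none ∧
          next (j + m) (L.insert c ((w.drop j).take m)) (V.insert ((w.drop j).take m) c) = true)) by
    intro k hk; exact H _ k rfl hk
  intro n
  induction n with
  | zero =>
      intro k hn hjk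
      unfold loopA
      rw [if_pos (by omega)]
      constructor
      · intro h; exact absurd h (by simp)
      · rintro ⟨m, h1, h2, _, _⟩; omega
  | succ n ih =>
      intro k hn hjk
      unfold loopA
      by_cases hkw : k > w.length
      · rw [if_pos hkw]
        constructor
        · intro h; exact absurd h (by simp)
        · rintro ⟨m, h1, h2, _, _⟩; exact absurd (le_trans h1 h2) (by omega)
      · rw [if_neg hkw]
        simp only [hc]
        have hkl : k ≤ w.length := by omega
        have hrec := ih (k + 1) (by omega) (by omega)
        have hstep :
            (∃ m, k + 1 ≤ j + m ∧ j + m ≤ w.length ∧ V.get? ((w.drop j).take m) = none ∧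
              next (j + m) (L.insert c ((w.drop j).take m)) (V.insert ((w.drop j).take m) c) = true) ∨
            (V.get? ((w.drop j).take (k - j)) = none ∧
              next k (L.insert c ((w.drop j).take (k - j))) (V.insert ((w.drop j).take (k - j)) c) = true) ↔
            (∃ m, k ≤ j + m ∧ j + m ≤ w.length ∧ V.get? ((w.drop j).take m) = none ∧
              next (j + m) (L.insert c ((w.drop j).take m)) (V.insert ((w.drop j).take m) c) = true) := by
          constructor
          · rintro (⟨m, h1, h2, h3, h4⟩ | ⟨h3, h4⟩)
            · exact ⟨m, by omega, h2, h3, h4⟩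
            · refine ⟨k - j, by omega, by omega, h3, ?_⟩
              have : j + (k - j) = k := by omega
              rw [this]; exact h4
          · rintro ⟨m, h1, h2, h3, h4⟩
            rcases Nat.lt_or_ge (j + m) (k + 1) with h | h
            · right
              have hm : m = k - j := by omega
              subst hm
              have : j + (k - j) = k := by omega
              rw [this] at h4
              exact ⟨h3, h4⟩
            · left; exact ⟨m, h, h2, h3, h4⟩
        rcases hV : V.get? ((w.drop j).take (k - j)) with _ | c0
        · simp only []
          by_cases hnext : next (j + ((w.drop j).take (k - j)).length)
              (L.insert c ((w.drop j).take (k - j))) (V.insert ((w.drop j).take (k - j)) c) = true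
          · rw [take_drop_len w j (k - j) (by omega)] at hnext
            have hkk : j + (k - j) = k := by omega
            rw [hkk] at hnext
            simp only [take_drop_len w j (k - j) (by omega), hkk, hnext, if_pos rfl]
            constructor
            · intro _
              refine ⟨k - j, by omega, by omega, hV, ?_⟩
              rw [hkk]; exact hnext
            · intro _; rfl
          · rw [take_drop_len w j (k - j) (by omega)] at hnext ⊢
            have hkk : j + (k - j) = k := by omega
            rw [hkk] at hnext ⊢
            rw [if_neg hnext, hrec, ← hstep]
            rw [Bool.not_eq_true] at hnext
            constructor
            · intro h; exact Or.inl h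
            · rintro (h | ⟨h3, h4⟩)
              · exact h
              · rw [h4] at hnext; exact absurd hnext (by simp)
        · simp only []
          rw [hrec, ← hstep]
          constructor
          · intro h; exact Or.inl h
          · rintro (h | ⟨h3, h4⟩)
            · exact h
            · rw [hV] at h3; exact absurd h3 (by simp)

lemma Renders_cons (g : Char → List Char) (c : Char) (q : List Char) :
    Renders g (c :: q) = g c ++ Renders g q := by
  simp [Renders]

lemma dfsA_leaf (p w : List Char) (j : Nat) (L : PySem.Dict Char (List Char))
    (V : PySem.Dict (List Char) Char) (hInv : InvAV L V) (hj : j ≤ w.length) :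
    (dfsA p w p.length j L V = true ↔ SATA p w p.length j (fun c => L.get? c)) := by
  unfold dfsA
  by_cases hjw : j = w.length
  · subst hjw
    rw [if_pos ⟨rfl, rfl⟩]
    constructor
    · intro _
      refine ⟨fun c => (L.get? c).getD [], ?_, ?_, ?_⟩
      · intro c s h
        show (L.get? c).getD [] = s
        rw [show L.get? c = some s from h]; rfl
      · intro a ha b hb hab
        simp only [Set.mem_union, Set.mem_setOf_eq, List.drop_length,
          List.not_mem_nil, false_or] at ha hb
        obtain ⟨s, hs⟩ := Option.isSome_iff_exists.mp ha
        obtain ⟨t, ht⟩ := Option.isSome_iff_exists.mp hb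
        replace hab : (L.get? a).getD [] = (L.get? b).getD [] := hab
        rw [hs, ht] at hab
        simp only [Option.getD_some] at hab
        subst hab
        have h1 := (hInv a s).mp hs
        have h2 := (hInv b s).mp ht
        rw [h1] at h2
        exact Option.some.inj h2
      · simp [Renders, List.drop_length]
    · intro _; rfl
  · rw [if_neg (by rintro ⟨-, h⟩; exact hjw h), if_pos (le_refl _)]
    constructor
    · intro h; exact absurd h (by simp)
    · rintro ⟨g, -, -, hr⟩
      exfalso
      rw [List.drop_length] at hr
      simp only [Renders, List.map_nil, List.flatten_nil] at hr
      have := congrArg List.length hr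
      simp only [List.length_nil, List.length_drop] at this
      omega

theorem dfsA_iff (p w : List Char) :
    ∀ (n i j : Nat) (L : PySem.Dict Char (List Char)) (V : PySem.Dict (List Char) Char),
      p.length - i = n → i ≤ p.length → j ≤ w.length → InvAV L V →
      (dfsA p w i j L V = true ↔ SATA p w i j (fun c => L.get? c)) := by
  intro n
  induction n with
  | zero =>
      intro i j L V hn hi hj hInv
      have hip : i = p.length := by omega
      subst hip
      exact dfsA_leaf p w j L V hInv hj
  | succ n ih =>
      intro i j L V hn hi hj hInv
      have hip : i < p.length := by omega
      have hunfold : dfsA p w i j L V =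
          loopA w (p.getD i ' ') (fun j' L' V' => dfsA p w (i + 1) j' L' V') j L V j := by
        rw [dfsA]
        rw [if_neg (by rintro ⟨h, -⟩; omega), if_neg (by omega)]
      rw [hunfold]
      have hgetD : p.getD i ' ' = p[i] := List.getD_eq_getElem p ' ' hip
      rw [hgetD]
      have hdrop : p.drop i = p[i] :: p.drop (i + 1) := List.drop_eq_getElem_cons hip
      rcases hLc : L.get? p[i] with _ | s
      · -- pattern[i] unassigned
        rw [loopA_none_iff w p[i] _ j L V hLc hj j (le_refl j)]
        constructor
        · rintro ⟨m, -, hm2, hfresh, hnext⟩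
          have hInv' := InvAV_insert L V hInv p[i] _ hLc hfresh
          beta_reduce at hnext
          rw [ih (i + 1) (j + m) _ _ (by omega) (by omega) hm2 hInv'] at hnext
          obtain ⟨g, hg1, hg2, hg3⟩ := hnext
          refine ⟨g, ?_, ?_, ?_⟩
          · intro c s hcs
            apply hg1
            beta_reduce
            rw [PySem.Dict.get?_insert, if_neg ?_]
            · exact hcs
            · rintro rfl; beta_reduce at hcs; rw [hLc] at hcs; cases hcs
          · apply hg2.mono
            intro x hx
            simp only [Set.mem_union, Set.mem_setOf_eq] at hx ⊢
            rw [hdrop] at hx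
            rcases hx with hx | hx
            · rcases List.mem_cons.mp hx with hx | hx
              · right; subst hx; rw [PySem.Dict.get?_insert, if_pos rfl]; rfl
              · left; exact hx
            · right
              rw [PySem.Dict.get?_insert]
              split
              · rfl
              · exact hx
          · rw [hdrop, Renders_cons]
            have hgc : g p[i] = (w.drop j).take m :=
              hg1 p[i] _ (by beta_reduce; rw [PySem.Dict.get?_insert, if_pos rfl])
            rw [hgc, hg3, take_append_drop_eq]
        · rintro ⟨g, hg1, hg2, hg3⟩
          rw [hdrop, Renders_cons] at hg3
          obtain ⟨hle, hs_eq, hrest⟩ := prefix_split w j (g p[i]) _ hj hg3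
          have hmem_i : p[i] ∈ ({c | c ∈ p.drop i} ∪ {c | ((L.get? c).isSome : Bool) = true} : Set Char) := by
            left; rw [hdrop]; exact List.mem_cons_self ..
          have hfresh : V.get? ((w.drop j).take (g p[i]).length) = none := by
            rw [← hs_eq]
            rcases hV : V.get? (g p[i]) with _ | c0
            · rfl
            · exfalso
              have hc0 : L.get? c0 = some (g p[i]) := (hInv c0 _).mpr hV
              have hgg : g c0 = g p[i] := hg1 c0 _ hc0
              have hmem_c0 : c0 ∈ ({c | c ∈ p.drop i} ∪ {c | ((L.get? c).isSome : Bool) = true} : Set Char) := by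
                right; simp only [Set.mem_setOf_eq, hc0]; rfl
              have : c0 = p[i] := hg2 hmem_c0 hmem_i hgg
              subst this
              rw [hLc] at hc0; cases hc0
          have hInv' := InvAV_insert L V hInv p[i] _ hLc hfresh
          refine ⟨(g p[i]).length, by omega, hle, hfresh, ?_⟩
          beta_reduce
          rw [ih (i + 1) (j + (g p[i]).length) _ _ (by omega) (by omega) hle hInv']
          refine ⟨g, ?_, ?_, ?_⟩
          · intro c t hct
            beta_reduce at hct
            rw [PySem.Dict.get?_insert] at hct
            by_cases hcc : c = p[i]
            · rw [if_pos hcc] at hct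
              rw [hcc]
              exact hs_eq.trans (Option.some.inj hct)
            · rw [if_neg hcc] at hct
              exact hg1 c t hct
          · apply hg2.mono
            intro x hx
            simp only [Set.mem_union, Set.mem_setOf_eq] at hx ⊢
            rcases hx with hx | hx
            · left; rw [hdrop]; exact List.mem_cons_of_mem _ hx
            · rw [PySem.Dict.get?_insert] at hx
              by_cases hxc : x = p[i]
              · left; rw [hdrop, hxc]; exact List.mem_cons_self ..
              · rw [if_neg hxc] at hx; right; exact hx
          · exact hrest
      · -- pattern[i] already assigned to s
        rw [loopA_some_iff w p[i] _ j L V s hLc hj j (le_refl j)]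
        constructor
        · rintro ⟨-, h2, h3, h4⟩
          beta_reduce at h4
          rw [ih (i + 1) (j + s.length) L V (by omega) (by omega) h2 hInv] at h4
          obtain ⟨g, hg1, hg2, hg3⟩ := h4
          refine ⟨g, hg1, ?_, ?_⟩
          · apply hg2.mono
            intro x hx
            simp only [Set.mem_union, Set.mem_setOf_eq] at hx ⊢
            rw [hdrop] at hx
            rcases hx with hx | hx
            · rcases List.mem_cons.mp hx with hx | hx
              · right; subst hx; rw [hLc]; rfl
              · left; exact hx
            · right; exact hx
          · rw [hdrop, Renders_cons, hg1 p[i] s hLc, hg3]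
            have hta := take_append_drop_eq w j s.length
            rw [h3] at hta
            exact hta
        · rintro ⟨g, hg1, hg2, hg3⟩
          rw [hdrop, Renders_cons] at hg3
          have hgc : g p[i] = s := hg1 p[i] s hLc
          rw [hgc] at hg3
          obtain ⟨hle, hs_eq, hrest⟩ := prefix_split w j s _ hj hg3
          refine ⟨by omega, hle, hs_eq.symm, ?_⟩
          beta_reduce
          rw [ih (i + 1) (j + s.length) L V (by omega) (by omega) hle hInv]
          refine ⟨g, hg1, ?_, hrest⟩
          apply hg2.mono
          intro x hx
          simp only [Set.mem_union, Set.mem_setOf_eq] at hx ⊢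
          rcases hx with hx | hx
          · left; rw [hdrop]; exact List.mem_cons_of_mem _ hx
          · right; exact hx

theorem patternMatching_A_iff (pattern value : String) :
    patternMatching pattern value = true ↔ SAT pattern.toList value.toList := by
  unfold patternMatching
  rw [dfsA_iff pattern.toList value.toList pattern.toList.length 0 0 _ _ (by omega) (by omega)
    (by omega) InvAV_empty]
  unfold SATA SAT
  have hset : ({c | c ∈ pattern.toList.drop 0} ∪
      {c | (((PySem.Dict.empty : PySem.Dict Char (List Char)).get? c).isSome : Bool) = true} : Set Char) =
      {c | c ∈ pattern.toList} := by
    ext x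
    simp [PySem.Dict.get?_empty]
  constructor
  · rintro ⟨g, -, hg2, hg3⟩
    rw [hset] at hg2
    rw [List.drop_zero] at hg3
    exact ⟨g, hg2, hg3⟩
  · rintro ⟨g, hg2, hg3⟩
    refine ⟨g, ?_, ?_, ?_⟩
    · intro c s h
      replace h : (PySem.Dict.empty : PySem.Dict Char (List Char)).get? c = some s := h
      rw [PySem.Dict.get?_empty] at h
      cases h
    · rw [hset]; exact hg2
    · rw [List.drop_zero]; exact hg3

-- ---- B-side helpers ----

-- the order/counts-building fold of B, named for the proofs
def ocStep (acc : List Char × PySem.Dict Char Nat) (c : Char) : List Char × PySem.Dict Char Nat :=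
  match acc.2.get? c with
  | some m => (acc.1, acc.2.insert c (m + 1))
  | none => (acc.1 ++ [c], acc.2.insert c 1)

lemma foldOC (p : List Char) :
    ∀ (o : List Char) (d : PySem.Dict Char Nat),
      o.Nodup → (∀ c, c ∈ o ↔ (d.get? c).isSome = true) →
      ((p.foldl ocStep (o, d)).1.Nodup ∧
       (∀ c, c ∈ (p.foldl ocStep (o, d)).1 ↔ c ∈ o ∨ c ∈ p) ∧
       (∀ c, (p.foldl ocStep (o, d)).2.getD c 0 = d.getD c 0 + p.count c)) := by
  induction p with
  | nil =>
      intro o d h1 _h2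
      refine ⟨h1, ?_, ?_⟩
      · intro c; simp
      · intro c; simp
  | cons a p ih =>
      intro o d h1 h2
      rw [List.foldl_cons]
      rcases hda : d.get? a with _ | m
      · have step_eq : ocStep (o, d) a = (o ++ [a], d.insert a 1) := by
          unfold ocStep; rw [hda]
        rw [step_eq]
        have ha : a ∉ o := by
          intro hmem
          have := (h2 a).mp hmem
          rw [hda] at this; exact absurd this (by simp)
        have h1' : (o ++ [a]).Nodup := by
          rw [← List.concat_eq_append]; exact h1.concat ha
        have h2' : ∀ c, c ∈ o ++ [a] ↔ ((d.insert a 1).get? c).isSome = true := by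
          intro c
          rw [List.mem_append, List.mem_singleton, PySem.Dict.get?_insert]
          by_cases hca : c = a
          · simp [hca]
          · simp only [if_neg hca, hca, or_false]
            exact h2 c
        obtain ⟨g1, g2, g3⟩ := ih (o ++ [a]) (d.insert a 1) h1' h2'
        refine ⟨g1, ?_, ?_⟩
        · intro c
          rw [g2 c, List.mem_append, List.mem_singleton, List.mem_cons]
          tauto
        · intro c
          rw [g3 c, PySem.Dict.getD_insert]
          by_cases hca : c = a
          · rw [if_pos hca, hca]
            have hd0 : d.getD a 0 = 0 := by rw [PySem.Dict.getD_eq_get?_getD, hda]; rfl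
            rw [hd0]
            simp only [List.count_cons_self]
            omega
          · rw [if_neg hca]
            have hac : ¬ (c = a) := hca
            have hac2 : ¬ (a = c) := fun e => hac e.symm
            simp [List.count_cons, hac, hac2]
      · have step_eq : ocStep (o, d) a = (o, d.insert a (m + 1)) := by
          unfold ocStep; rw [hda]
        rw [step_eq]
        have ha : a ∈ o := by rw [h2 a, hda]; rfl
        have h2' : ∀ c, c ∈ o ↔ ((d.insert a (m + 1)).get? c).isSome = true := by
          intro c
          rw [PySem.Dict.get?_insert]
          by_cases hca : c = a
          · simp [hca, ha]
          · rw [if_neg hca]; exact h2 c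
        obtain ⟨g1, g2, g3⟩ := ih o (d.insert a (m + 1)) h1 h2'
        refine ⟨g1, ?_, ?_⟩
        · intro c
          rw [g2 c, List.mem_cons]
          constructor
          · rintro (h | h)
            · exact Or.inl h
            · exact Or.inr (Or.inr h)
          · rintro (h | h | h)
            · exact Or.inl h
            · exact Or.inl (h ▸ ha)
            · exact Or.inr h
        · intro c
          rw [g3 c, PySem.Dict.getD_insert]
          by_cases hca : c = a
          · rw [if_pos hca, hca]
            have hd0 : d.getD a 0 = m := by rw [PySem.Dict.getD_eq_get?_getD, hda]; rfl
            rw [hd0]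
            simp only [List.count_cons_self]
            omega
          · rw [if_neg hca]
            have hac : ¬ (c = a) := hca
            have hac2 : ¬ (a = c) := fun e => hac e.symm
            simp [List.count_cons, hac, hac2]

lemma count_split_sum (θ : Char → Nat) (a : Char) :
    ∀ q : List Char,
      (q.map θ).sum = q.count a * θ a + ((q.filter (fun x => !(x == a))).map θ).sum := by
  intro q
  induction q with
  | nil => simp
  | cons b q ih =>
      by_cases hba : b = a
      · subst hba
        rw [List.map_cons, List.sum_cons, List.count_cons_self, List.filter_cons,
          if_neg (by simp), ih, Nat.succ_mul]
        omega
      · rw [List.map_cons, List.sum_cons, List.filter_cons, if_pos (by simp [hba]),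
          List.map_cons, List.sum_cons]
        have hab : ¬ (a = b) := fun e => hba e.symm
        rw [show (b :: q).count a = q.count a from by simp [List.count_cons, hab, hba], ih]
        omega

lemma sum_map_over_dedup (θ : Char → Nat) :
    ∀ (os q : List Char), os.Nodup → (∀ x ∈ q, x ∈ os) →
      (q.map θ).sum = (os.map (fun c => q.count c * θ c)).sum := by
  intro os
  induction os with
  | nil =>
      intro q _ h
      have : q = [] := List.eq_nil_iff_forall_not_mem.mpr (fun x hx => List.not_mem_nil (h x hx))
      subst this; simp
  | cons a os ih =>
      intro q hnd h
      have hq := count_split_sum θ a q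
      rw [List.map_cons, List.sum_cons]
      have h1 : ∀ x ∈ q.filter (fun x => !(x == a)), x ∈ os := by
        intro x hx
        have hxq := (List.mem_filter.mp hx).1
        have hxa : (!(x == a)) = true := (List.mem_filter.mp hx).2
        have hxa' : x ≠ a := by simpa using hxa
        rcases List.mem_cons.mp (h x hxq) with e | hmem
        · exact absurd e hxa'
        · exact hmem
      have h2 : ∀ c ∈ os, (q.filter (fun x => !(x == a))).count c = q.count c := by
        intro c hc
        have hca : (!(c == a)) = true := by
          have : c ≠ a := fun e => (List.nodup_cons.mp hnd).1 (e ▸ hc)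
          simpa using this
        exact List.count_filter hca
      have h3 : os.map (fun c => (q.filter (fun x => !(x == a))).count c * θ c) =
          os.map (fun c => q.count c * θ c) :=
        List.map_congr_left (fun c hc => by rw [h2 c hc])
      rw [ih (q.filter (fun x => !(x == a))) (List.nodup_cons.mp hnd).2 h1, h3] at hq
      exact hq

lemma length_Renders (g : Char → List Char) (q : List Char) :
    (Renders g q).length = (q.map (fun c => (g c).length)).sum := by
  simp [Renders, List.map_map, Function.comp_def]

lemma getD_foldl_insert (F : Char → Nat) :
    ∀ (os : List Char) (d : PySem.Dict Char Nat) (x : Char),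
      (os.foldl (fun d c => d.insert c (F c)) d).getD x 0 =
        if x ∈ os then F x else d.getD x 0 := by
  intro os
  induction os with
  | nil => intro d x; simp
  | cons a os ih =>
      intro d x
      rw [List.foldl_cons, ih]
      by_cases hmem : x ∈ os
      · rw [if_pos hmem, if_pos (List.mem_cons_of_mem _ hmem)]
      · rw [if_neg hmem, PySem.Dict.getD_insert]
        by_cases hxa : x = a
        · subst hxa
          rw [if_pos rfl, if_pos (List.mem_cons_self ..)]
        · rw [if_neg hxa, if_neg (by rw [List.mem_cons]; rintro (e | e) <;> [exact hxa e; exact hmem e])]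

lemma verifyB_congr (w : List Char) (lens lens' : PySem.Dict Char Nat)
    (h : ∀ c, lens.getD c 0 = lens'.getD c 0) :
    ∀ (q : List Char) (pos : Nat) (mp : PySem.Dict Char (List Char)) (seen : PySem.Set (List Char)),
      verifyB w lens q pos mp seen = verifyB w lens' q pos mp seen := by
  intro q
  induction q with
  | nil => intro pos mp seen; rfl
  | cons c q ih =>
      intro pos mp seen
      simp only [verifyB]
      rw [← h c]
      rcases hmc : mp.get? c with _ | s' <;> simp only [hmc]
      · split
        · rfl
        · exact ih _ _ _
      · split
        · exact ih _ _ _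
        · rfl

lemma loopB_iff (c : Char) (cnt rem : Nat) (lens : PySem.Dict Char Nat)
    (next : Nat → PySem.Dict Char Nat → Bool) (hcnt : 0 < cnt) :
    ∀ l, (loopB c cnt rem lens next l = true ↔
      ∃ l', l ≤ l' ∧ cnt * l' ≤ rem ∧ next (rem - cnt * l') (lens.insert c l') = true) := by
  suffices H : ∀ n l, rem / cnt + 1 - l = n →
      (loopB c cnt rem lens next l = true ↔
        ∃ l', l ≤ l' ∧ cnt * l' ≤ rem ∧ next (rem - cnt * l') (lens.insert c l') = true) by
    intro l; exact H _ l rfl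
  intro n
  induction n with
  | zero =>
      intro l hn
      unfold loopB
      rw [if_pos (by omega)]
      constructor
      · intro h; exact absurd h (by simp)
      · rintro ⟨l', h1, h2, -⟩
        exfalso
        have : l' ≤ rem / cnt := (Nat.le_div_iff_mul_le hcnt).mpr (by rw [Nat.mul_comm]; omega)
        omega
  | succ n ih =>
      intro l hn
      unfold loopB
      by_cases hl : l > rem / cnt
      · rw [if_pos hl]
        constructor
        · intro h; exact absurd h (by simp)
        · rintro ⟨l', h1, h2, -⟩
          exfalso
          have : l' ≤ rem / cnt := (Nat.le_div_iff_mul_le hcnt).mpr (by rw [Nat.mul_comm]; omega)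
          omega
      · rw [if_neg hl]
        have hcl : cnt * l ≤ rem := by
          have hh := (Nat.le_div_iff_mul_le hcnt).mp (by omega : l ≤ rem / cnt)
          rw [Nat.mul_comm] at hh
          exact hh
        by_cases hnext : next (rem - cnt * l) (lens.insert c l) = true
        · rw [if_pos hnext]
          constructor
          · intro _; exact ⟨l, le_refl _, hcl, hnext⟩
          · intro _; rfl
        · rw [if_neg hnext, ih (l + 1) (by omega)]
          constructor
          · rintro ⟨l', h1, h2, h3⟩
            exact ⟨l', by omega, h2, h3⟩
          · rintro ⟨l', h1, h2, h3⟩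
            refine ⟨l', ?_, h2, h3⟩
            rcases Nat.lt_or_ge l l' with hlt | hge
            · omega
            · exfalso
              have : l' = l := by omega
              rw [this] at h3
              exact hnext h3

lemma chooseB_iff (order : List Char) (counts : PySem.Dict Char Nat)
    (vf : PySem.Dict Char Nat → Bool)
    (hnd : order.Nodup) (hcnt : ∀ c ∈ order, 0 < counts.getD c 0)
    (hvf : ∀ d d', (∀ c, d.getD c 0 = d'.getD c 0) → vf d = vf d') :
    ∀ (n idx rem : Nat) (lens : PySem.Dict Char Nat),
      order.length - idx = n → idx ≤ order.length →
      (chooseB order counts vf idx rem lens = true ↔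
        ∃ lens', (∀ c, c ∉ order.drop idx → lens'.getD c 0 = lens.getD c 0) ∧
          ((order.drop idx).map (fun c => counts.getD c 0 * lens'.getD c 0)).sum = rem ∧
          vf lens' = true) := by
  intro n
  induction n with
  | zero =>
      intro idx rem lens hn hidx
      have hix : idx = order.length := by omega
      unfold chooseB
      rw [if_pos (by omega)]
      subst hix
      rw [List.drop_length]
      simp only [List.map_nil, List.sum_nil, List.not_mem_nil, not_false_iff, forall_true_left]
      rw [Bool.and_eq_true, beq_iff_eq]
      constructor
      · rintro ⟨h0, hv⟩
        exact ⟨lens, fun c => rfl, h0.symm, hv⟩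
      · rintro ⟨lens', he, h0, hv⟩
        refine ⟨h0.symm, ?_⟩
        rw [hvf lens lens' (fun c => (he c).symm)]
        exact hv
  | succ n ih =>
      intro idx rem lens hn hidx
      have hix : idx < order.length := by omega
      unfold chooseB
      rw [if_neg (by omega)]
      have hgetD : order.getD idx ' ' = order[idx] := List.getD_eq_getElem order ' ' hix
      rw [hgetD]
      have hdropo : order.drop idx = order[idx] :: order.drop (idx + 1) :=
        List.drop_eq_getElem_cons hix
      have hmemo : order[idx] ∈ order := List.getElem_mem hix
      have hnotin : order[idx] ∉ order.drop (idx + 1) := by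
        have hnd' : (order.drop idx).Nodup := hnd.sublist (List.drop_sublist idx order)
        rw [hdropo] at hnd'
        exact (List.nodup_cons.mp hnd').1
      have hcnt0 : 0 < counts.getD order[idx] 0 := hcnt _ hmemo
      rw [loopB_iff order[idx] _ rem lens _ hcnt0 0]
      constructor
      · rintro ⟨l', -, hle, hch⟩
        beta_reduce at hch
        rw [ih (idx + 1) (rem - counts.getD order[idx] 0 * l') (lens.insert order[idx] l')
          (by omega) (by omega)] at hch
        obtain ⟨lens'', e1, e2, e3⟩ := hch
        refine ⟨lens'', ?_, ?_, e3⟩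
        · intro c hc
          rw [hdropo, List.mem_cons] at hc
          push_neg at hc
          rw [e1 c hc.2, PySem.Dict.getD_insert, if_neg hc.1]
        · rw [hdropo, List.map_cons, List.sum_cons]
          have hc_eq : lens''.getD order[idx] 0 = l' := by
            rw [e1 order[idx] hnotin, PySem.Dict.getD_insert, if_pos rfl]
          rw [hc_eq, e2]
          omega
      · rintro ⟨lens', e1, e2, e3⟩
        rw [hdropo, List.map_cons, List.sum_cons] at e2
        refine ⟨lens'.getD order[idx] 0, Nat.zero_le _, by omega, ?_⟩
        beta_reduce
        rw [ih (idx + 1) (rem - counts.getD order[idx] 0 * lens'.getD order[idx] 0)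
          (lens.insert order[idx] (lens'.getD order[idx] 0)) (by omega) (by omega)]
        refine ⟨lens', ?_, by omega, e3⟩
        intro c hc
        rw [PySem.Dict.getD_insert]
        by_cases hcc : c = order[idx]
        · rw [if_pos hcc, hcc]
        · rw [if_neg hcc]
          apply e1
          rw [hdropo, List.mem_cons]
          push_neg
          exact ⟨hcc, hc⟩

lemma verify_iff (w : List Char) (lens : PySem.Dict Char Nat) :
    ∀ (q : List Char) (pos : Nat) (mp : PySem.Dict Char (List Char)) (seen : PySem.Set (List Char)),
      (∀ s, s ∈ seen ↔ ∃ c, mp.get? c = some s) →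
      (∀ c c' s, mp.get? c = some s → mp.get? c' = some s → c = c') →
      pos + (q.map (fun c => lens.getD c 0)).sum = w.length →
      (verifyB w lens q pos mp seen = true ↔
        ∃ g : Char → List Char,
          (∀ c s, mp.get? c = some s → g c = s) ∧
          Set.InjOn g ({c | c ∈ q} ∪ {c | (mp.get? c).isSome = true}) ∧
          (∀ c ∈ q, (g c).length = lens.getD c 0) ∧
          Renders g q = w.drop pos) := by
  intro q
  induction q with
  | nil =>
      intro pos mp seen hseen hinj hsum
      simp only [verifyB]
      constructor
      · intro _
        have hpos : pos = w.length := by simpa using hsum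
        refine ⟨fun c => (mp.get? c).getD [], ?_, ?_, ?_, ?_⟩
        · intro c s h
          show (mp.get? c).getD [] = s
          rw [show mp.get? c = some s from h]; rfl
        · intro a ha b hb hab
          simp only [Set.mem_union, Set.mem_setOf_eq, List.not_mem_nil, false_or] at ha hb
          obtain ⟨s, hs⟩ := Option.isSome_iff_exists.mp ha
          obtain ⟨t, ht⟩ := Option.isSome_iff_exists.mp hb
          replace hab : (mp.get? a).getD [] = (mp.get? b).getD [] := hab
          rw [hs, ht] at hab
          simp only [Option.getD_some] at hab
          subst hab
          exact hinj a b s hs ht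
        · intro c hc; exact absurd hc List.not_mem_nil
        · rw [hpos, List.drop_length]; simp [Renders]
      · intro _; trivial
  | cons c q ihq =>
      intro pos mp seen hseen hinj hsum
      have hsum' : pos + lens.getD c 0 + (q.map (fun c => lens.getD c 0)).sum = w.length := by
        simp only [List.map_cons, List.sum_cons] at hsum; omega
      have hposl : pos + lens.getD c 0 ≤ w.length := by omega
      have hpos : pos ≤ w.length := by omega
      have hSlen : ((w.drop pos).take (lens.getD c 0)).length = lens.getD c 0 :=
        take_drop_len w pos _ hposl
      have hSapp : (w.drop pos).take (lens.getD c 0) ++ w.drop (pos + lens.getD c 0) = w.drop pos :=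
        take_append_drop_eq w pos _
      have key : ∀ g : Char → List Char, (g c).length = lens.getD c 0 →
          Renders g (c :: q) = w.drop pos →
          g c = (w.drop pos).take (lens.getD c 0) ∧
            Renders g q = w.drop (pos + lens.getD c 0) := by
        intro g hlen hren
        rw [Renders_cons] at hren
        obtain ⟨-, hs_eq, hrest⟩ := prefix_split w pos (g c) _ hpos hren
        rw [hlen] at hs_eq hrest
        exact ⟨hs_eq, hrest⟩
      rcases hmc : mp.get? c with _ | s'
      · -- unassigned letter
        simp only [verifyB, hmc]
        by_cases hcont : seen.contains ((w.drop pos).take (lens.getD c 0)) = true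
        · rw [if_pos hcont]
          constructor
          · intro hf; exact absurd hf (by simp)
          · rintro ⟨g, hg1, hg2, hg3, hg4⟩
            exfalso
            obtain ⟨c0, hc0⟩ := (hseen _).mp ((PySem.Set.contains_iff ..).mp hcont)
            have hgc := (key g (hg3 c (List.mem_cons_self ..)) hg4).1
            have hgc0 : g c0 = (w.drop pos).take (lens.getD c 0) := hg1 c0 _ hc0
            have hne : c ≠ c0 := by rintro rfl; rw [hmc] at hc0; cases hc0
            have hcmem : c ∈ ({x | x ∈ c :: q} ∪ {x | (mp.get? x).isSome = true} : Set Char) :=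
              Or.inl (List.mem_cons_self ..)
            have hc0mem : c0 ∈ ({x | x ∈ c :: q} ∪ {x | (mp.get? x).isSome = true} : Set Char) :=
              Or.inr (by simp only [Set.mem_setOf_eq, hc0]; rfl)
            exact hne (hg2 hcmem hc0mem (hgc.trans hgc0.symm))
        · rw [if_neg hcont]
          have hnotseen : (w.drop pos).take (lens.getD c 0) ∉ seen :=
            fun hmem => hcont ((PySem.Set.contains_iff ..).mpr hmem)
          have hseen' : ∀ t, t ∈ seen.add ((w.drop pos).take (lens.getD c 0)) ↔
              ∃ c0, (mp.insert c ((w.drop pos).take (lens.getD c 0))).get? c0 = some t := by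
            intro t
            rw [PySem.Set.mem_add]
            constructor
            · rintro (ht | rfl)
              · obtain ⟨c0, hc0⟩ := (hseen t).mp ht
                have hne : c0 ≠ c := by rintro rfl; rw [hmc] at hc0; cases hc0
                exact ⟨c0, by rw [PySem.Dict.get?_insert, if_neg hne]; exact hc0⟩
              · exact ⟨c, by rw [PySem.Dict.get?_insert, if_pos rfl]⟩
            · rintro ⟨c0, hc0⟩
              rw [PySem.Dict.get?_insert] at hc0
              by_cases hcc : c0 = c
              · rw [if_pos hcc] at hc0; right; exact (Option.some.inj hc0).symm
              · rw [if_neg hcc] at hc0; left; exact (hseen t).mpr ⟨c0, hc0⟩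
          have hinj' : ∀ c1 c2 t,
              (mp.insert c ((w.drop pos).take (lens.getD c 0))).get? c1 = some t →
              (mp.insert c ((w.drop pos).take (lens.getD c 0))).get? c2 = some t → c1 = c2 := by
            intro c1 c2 t h1 h2
            rw [PySem.Dict.get?_insert] at h1 h2
            by_cases e1 : c1 = c <;> by_cases e2 : c2 = c
            · rw [e1, e2]
            · exfalso
              rw [if_pos e1] at h1
              rw [if_neg e2] at h2
              apply hnotseen
              rw [Option.some.inj h1]
              exact (hseen t).mpr ⟨c2, h2⟩
            · exfalso
              rw [if_neg e1] at h1
              rw [if_pos e2] at h2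
              apply hnotseen
              rw [Option.some.inj h2]
              exact (hseen t).mpr ⟨c1, h1⟩
            · rw [if_neg e1] at h1
              rw [if_neg e2] at h2
              exact hinj c1 c2 t h1 h2
          rw [ihq (pos + lens.getD c 0) (mp.insert c ((w.drop pos).take (lens.getD c 0)))
            (seen.add ((w.drop pos).take (lens.getD c 0))) hseen' hinj' hsum']
          constructor
          · rintro ⟨g, hg1, hg2, hg3, hg4⟩
            have hgc : g c = (w.drop pos).take (lens.getD c 0) :=
              hg1 c _ (by rw [PySem.Dict.get?_insert, if_pos rfl])
            refine ⟨g, ?_, ?_, ?_, ?_⟩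
            · intro c0 t h0
              have hne : c0 ≠ c := by rintro rfl; rw [hmc] at h0; cases h0
              exact hg1 c0 t (by rw [PySem.Dict.get?_insert, if_neg hne]; exact h0)
            · apply hg2.mono
              intro x hx
              simp only [Set.mem_union, Set.mem_setOf_eq, List.mem_cons] at hx ⊢
              rcases hx with (rfl | hx) | hx
              · right; rw [PySem.Dict.get?_insert, if_pos rfl]; rfl
              · left; exact hx
              · right
                rw [PySem.Dict.get?_insert]
                split
                · rfl
                · exact hx
            · intro c0 h0
              rcases List.mem_cons.mp h0 with rfl | hmem
              · rw [hgc, hSlen]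
              · exact hg3 c0 hmem
            · rw [Renders_cons, hgc, hg4, hSapp]
          · rintro ⟨g, hg1, hg2, hg3, hg4⟩
            have hk := key g (hg3 c (List.mem_cons_self ..)) hg4
            refine ⟨g, ?_, ?_, fun c0 h0 => hg3 c0 (List.mem_cons_of_mem _ h0), hk.2⟩
            · intro c0 t h0
              rw [PySem.Dict.get?_insert] at h0
              by_cases hcc : c0 = c
              · rw [if_pos hcc] at h0
                rw [hcc, hk.1]
                exact Option.some.inj h0
              · rw [if_neg hcc] at h0; exact hg1 c0 t h0
            · apply hg2.mono
              intro x hx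
              simp only [Set.mem_union, Set.mem_setOf_eq, List.mem_cons] at hx ⊢
              rcases hx with hx | hx
              · left; right; exact hx
              · rw [PySem.Dict.get?_insert] at hx
                by_cases hcc : x = c
                · left; left; exact hcc
                · rw [if_neg hcc] at hx; right; exact hx
      · -- letter already assigned to s'
        simp only [verifyB, hmc]
        by_cases hss : s' = (w.drop pos).take (lens.getD c 0)
        · rw [if_pos hss, ihq (pos + lens.getD c 0) mp seen hseen hinj hsum']
          constructor
          · rintro ⟨g, hg1, hg2, hg3, hg4⟩
            refine ⟨g, hg1, ?_, ?_, ?_⟩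
            · apply hg2.mono
              intro x hx
              simp only [Set.mem_union, Set.mem_setOf_eq, List.mem_cons] at hx ⊢
              rcases hx with (rfl | hx) | hx
              · right; rw [hmc]; rfl
              · left; exact hx
              · right; exact hx
            · intro c0 h0
              rcases List.mem_cons.mp h0 with rfl | hmem
              · rw [hg1 c0 s' hmc, hss, hSlen]
              · exact hg3 c0 hmem
            · rw [Renders_cons, hg1 c s' hmc, hss, hg4, hSapp]
          · rintro ⟨g, hg1, hg2, hg3, hg4⟩
            have hk := key g (hg3 c (List.mem_cons_self ..)) hg4
            refine ⟨g, hg1, ?_, fun c0 h0 => hg3 c0 (List.mem_cons_of_mem _ h0), hk.2⟩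
            apply hg2.mono
            intro x hx
            simp only [Set.mem_union, Set.mem_setOf_eq, List.mem_cons] at hx ⊢
            rcases hx with hx | hx
            · left; right; exact hx
            · right; exact hx
        · rw [if_neg hss]
          constructor
          · intro hf; exact absurd hf (by simp)
          · rintro ⟨g, hg1, hg2, hg3, hg4⟩
            exfalso
            have hgc := (key g (hg3 c (List.mem_cons_self ..)) hg4).1
            exact hss ((hg1 c s' hmc).symm.trans hgc)

theorem patternMatching_B_iff (pattern value : String) :
    patternMatching_alt pattern value = true ↔ SAT pattern.toList value.toList := by
  have heq : patternMatching_alt pattern value =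
      chooseB (pattern.toList.foldl ocStep ([], PySem.Dict.empty)).1
        (pattern.toList.foldl ocStep ([], PySem.Dict.empty)).2
        (fun lens => verifyB value.toList lens pattern.toList 0 PySem.Dict.empty PySem.Set.empty)
        0 value.toList.length PySem.Dict.empty := rfl
  rw [heq]
  obtain ⟨hnd, hmem0, hcount0⟩ := foldOC pattern.toList [] PySem.Dict.empty List.nodup_nil
    (by intro c; rw [PySem.Dict.get?_empty]; simp)
  set p := pattern.toList with hp
  set w := value.toList with hw
  set O := (p.foldl ocStep ([], PySem.Dict.empty)).1 with hO
  set C := (p.foldl ocStep ([], PySem.Dict.empty)).2 with hC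
  have hmem : ∀ c, c ∈ O ↔ c ∈ p := by
    intro c; rw [hmem0 c]; simp
  have hcountC : ∀ c, C.getD c 0 = p.count c := by
    intro c; rw [hcount0 c]; simp [PySem.Dict.getD_empty]
  have hcnt : ∀ c ∈ O, 0 < C.getD c 0 := by
    intro c hc; rw [hcountC c]; exact List.count_pos_iff.mpr ((hmem c).mp hc)
  have hvf : ∀ d d', (∀ c, d.getD c 0 = d'.getD c 0) →
      verifyB w d p 0 PySem.Dict.empty PySem.Set.empty =
      verifyB w d' p 0 PySem.Dict.empty PySem.Set.empty := by
    intro d d' h; exact verifyB_congr w d d' h p 0 _ _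
  have hset : ({x | x ∈ p} ∪
      {x | (((PySem.Dict.empty : PySem.Dict Char (List Char)).get? x).isSome : Bool) = true} : Set Char) =
      {x | x ∈ p} := by
    ext x; simp [PySem.Dict.get?_empty]
  have hseen0 : ∀ s : List Char, s ∈ (PySem.Set.empty : PySem.Set (List Char)) ↔
      ∃ c, (PySem.Dict.empty : PySem.Dict Char (List Char)).get? c = some s := by
    intro s; simp [PySem.Set.empty, PySem.Dict.get?_empty]
  have hinj0 : ∀ (c1 c2 : Char) (s : List Char),
      (PySem.Dict.empty : PySem.Dict Char (List Char)).get? c1 = some s →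
      (PySem.Dict.empty : PySem.Dict Char (List Char)).get? c2 = some s → c1 = c2 := by
    intro c1 c2 s h1 _
    rw [PySem.Dict.get?_empty] at h1; cases h1
  rw [chooseB_iff O C _ hnd hcnt hvf O.length 0 w.length PySem.Dict.empty (by omega) (by omega)]
  simp only [List.drop_zero]
  constructor
  · rintro ⟨lens', -, hsum, hver⟩
    have hsum2 : 0 + (p.map (fun c => lens'.getD c 0)).sum = w.length := by
      rw [Nat.zero_add,
        sum_map_over_dedup (fun c => lens'.getD c 0) O p hnd (fun x hx => (hmem x).mpr hx), ← hsum]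
      apply congrArg List.sum
      apply List.map_congr_left
      intro c _
      rw [hcountC c]
    beta_reduce at hver
    rw [verify_iff w lens' p 0 PySem.Dict.empty PySem.Set.empty hseen0 hinj0 hsum2] at hver
    obtain ⟨g, -, hg2, -, hg4⟩ := hver
    rw [hset] at hg2
    rw [List.drop_zero] at hg4
    exact ⟨g, hg2, hg4⟩
  · rintro ⟨g, hinjg, hreng⟩
    have hlensD : ∀ x : Char,
        (O.foldl (fun d c => d.insert c (g c).length) PySem.Dict.empty).getD x 0 =
          if x ∈ O then (g x).length else 0 := by
      intro x
      rw [getD_foldl_insert]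
      by_cases hx : x ∈ O
      · rw [if_pos hx, if_pos hx]
      · rw [if_neg hx, if_neg hx]
        simp [PySem.Dict.getD_empty]
    have hsump : (p.map (fun c =>
        (O.foldl (fun d c => d.insert c (g c).length) PySem.Dict.empty).getD c 0)).sum = w.length := by
      have hmapeq : p.map (fun c =>
          (O.foldl (fun d c => d.insert c (g c).length) PySem.Dict.empty).getD c 0) =
          p.map (fun c => (g c).length) := by
        apply List.map_congr_left
        intro c hc
        rw [hlensD c, if_pos ((hmem c).mpr hc)]
      rw [hmapeq, ← length_Renders g p, hreng]
    refine ⟨O.foldl (fun d c => d.insert c (g c).length) PySem.Dict.empty, ?_, ?_, ?_⟩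
    · intro c hc
      rw [hlensD c, if_neg hc]
      simp [PySem.Dict.getD_empty]
    · have hOmap : O.map (fun c => C.getD c 0 *
          (O.foldl (fun d c => d.insert c (g c).length) PySem.Dict.empty).getD c 0) =
          O.map (fun c => p.count c * (g c).length) := by
        apply List.map_congr_left
        intro c hc
        rw [hcountC c, hlensD c, if_pos hc]
      rw [hOmap,
        ← sum_map_over_dedup (fun c => (g c).length) O p hnd (fun x hx => (hmem x).mpr hx),
        ← length_Renders g p, hreng]
    · beta_reduce
      rw [verify_iff w _ p 0 PySem.Dict.empty PySem.Set.empty hseen0 hinj0 (by rw [Nat.zero_add]; exact hsump)]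
      refine ⟨g, ?_, ?_, ?_, ?_⟩
      · intro c s h
        rw [PySem.Dict.get?_empty] at h; cases h
      · rw [hset]; exact hinjg
      · intro c hc
        rw [hlensD c, if_pos ((hmem c).mpr hc)]
      · rw [List.drop_zero]; exact hreng

-- ===== VERDICT (by name: the statement is the Claim_ definition above) =====
theorem patternMatching_spec : Claim_equal_patternMatching := by
  intro pattern value _
  unfold Spec_patternMatching
  have hA := patternMatching_A_iff pattern value
  have hB := patternMatching_B_iff pattern value
  rcases hb : patternMatching_alt pattern value with _ | _
  · rcases ha : patternMatching pattern value with _ | _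
    · rfl
    · exact absurd (hB.mpr (hA.mp ha)) (by simp [hb])
  · exact hA.mpr (hB.mp hb)
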